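-- pv_equiv track=rewrite | github.com/viniciuspdre/python-facul | maiuscula.py | palavraMaius
-- ===== SOURCE A (Python) =====
-- def separar(string):
--     palavra = ''
--     palavras = []
--     for i in range(len(string)):
--         if string[i] == ' ':
--             palavras.append(palavra)
--             palavra = ''
--         elif i == len(string)-1:
--             palavra += string[i]
--             palavras.append(palavra)
--         else:
--             palavra += string[i]
--     return palavras
--
-- def palavraMaius(string):
--     palavrasSep = separar(string)
--     novaString = ''
--     minusculas = 'abcdefghijklmnopqrstuvwxyz'
--     maiusculas = 'ABCDEFGHIJKLMNOPQRSTUVWXYZ'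
--     for i in range(len(palavrasSep)):
--         palavra = palavrasSep[i]
--         for j in range(len(palavra)):
--             for k in range(len(minusculas)):
--                 if palavra[j] == minusculas[k]:
--                     novaString += maiusculas[k]
--                 elif palavra[j] == maiusculas[k]:
--                     novaString += palavra[j]
--         novaString += ' '
--     return novaString
-- ===== SOURCE B (Python) =====
-- def palavraMaius(string):
--     out = []
--     for c in string:
--         if c == ' ':
--             out.append(' ')
--         elif 'a' <= c <= 'z':
--             out.append(chr(ord(c) - 32))
--         elif 'A' <= c <= 'Z':
--             out.append(c)
--     if string and string[-1] != ' ':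
--         out.append(' ')
--     return ''.join(out)
-- ===== Notes on version B (the rewrite author's own statement) =====
-- stated objective: faster
-- what changed: Replaced A's split-into-words pass plus triple-nested loop (word x character x whole 26-letter alphabet scan with string concatenation) by a single left-to-right pass over the characters with direct ASCII-range tests and one trailing-space correction.
import Mathlib
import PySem

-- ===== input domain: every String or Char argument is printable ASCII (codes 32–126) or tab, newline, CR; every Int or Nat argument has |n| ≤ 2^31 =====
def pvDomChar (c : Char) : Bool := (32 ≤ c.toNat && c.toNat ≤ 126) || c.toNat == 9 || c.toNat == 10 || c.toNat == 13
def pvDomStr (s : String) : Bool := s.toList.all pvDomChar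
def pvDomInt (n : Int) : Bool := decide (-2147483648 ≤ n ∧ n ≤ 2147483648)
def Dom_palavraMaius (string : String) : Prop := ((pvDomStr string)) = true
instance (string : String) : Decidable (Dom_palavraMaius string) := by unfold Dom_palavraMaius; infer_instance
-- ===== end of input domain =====

-- B replaces A's split-into-words pass plus triple-nested 26-letter scan by a single
-- left-to-right pass over the characters with a direct ASCII-range case split (objective: faster; measured faster in a timing run).

-- ===== PORT A =====
-- helper 'separar': the index loop 'for i in range(len(string))' is transcribed as structural
-- recursion on the remaining characters, with the running word and word list as accumulators;
-- Python's 'i == len(string)-1' test is exactly 'rest = []' here.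
def pvSeparar (palavra : List Char) (palavras : List (List Char)) : List Char → List (List Char)
  | [] => palavras
  | c :: rest =>
    if c = ' ' then pvSeparar [] (palavras ++ [palavra]) rest
    else if rest = [] then pvSeparar (palavra ++ [c]) (palavras ++ [palavra ++ [c]]) rest
    else pvSeparar (palavra ++ [c]) palavras rest

-- the two alphabet constants of A, as their character lists
def pvMinus : List Char := ['a','b','c','d','e','f','g','h','i','j','k','l','m','n','o','p','q','r','s','t','u','v','w','x','y','z']
def pvMaius : List Char := ['A','B','C','D','E','F','G','H','I','J','K','L','M','N','O','P','Q','R','S','T','U','V','W','X','Y','Z']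

def palavraMaius (string : String) : String :=
  let palavrasSep := pvSeparar [] [] string.toList
  let nova := palavrasSep.foldl (fun nova palavra =>
    (palavra.foldl (fun nova cj =>
      (List.range 26).foldl (fun nova k =>
        if cj = pvMinus.getD k ' ' then nova ++ [pvMaius.getD k ' ']
        else if cj = pvMaius.getD k ' ' then nova ++ [cj]
        else nova) nova) nova) ++ [' ']) []
  String.ofList nova

-- ===== PORT B =====
def palavraMaius_alt (string : String) : String :=
  let s := string.toList
  let out := s.foldl (fun out c =>
    if c = ' ' then out ++ [' ']
    else if 'a' ≤ c ∧ c ≤ 'z' then out ++ [Char.ofNat (c.toNat - 32)]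
    else if 'A' ≤ c ∧ c ≤ 'Z' then out ++ [c]
    else out) []
  let out := if s ≠ [] ∧ s.getLast? ≠ some ' ' then out ++ [' '] else out
  String.ofList out

-- ===== PRECONDITION & SPEC =====
def Spec_palavraMaius (string : String) (out : String) : Prop := out = palavraMaius_alt string
instance (string : String) (out : String) : Decidable (Spec_palavraMaius string out) := by unfold Spec_palavraMaius; infer_instance

-- ===== CLAIM (what is proved, stated in full; the proofs are below) =====
def Claim_equal_palavraMaius : Prop := ∀ (string : String), Dom_palavraMaius string → Spec_palavraMaius string (palavraMaius string)

-- ===== LEMMAS AND PROOFS =====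

-- what B appends for one non-space character
def pvLtr (c : Char) : List Char :=
  if 'a' ≤ c ∧ c ≤ 'z' then [Char.ofNat (c.toNat - 32)]
  else if 'A' ≤ c ∧ c ≤ 'Z' then [c] else []

-- what B appends for one character
def pvTr (c : Char) : List Char := if c = ' ' then [' '] else pvLtr c

-- B's trailing-space correction
def pvEnd (s : List Char) : List Char := if s ≠ [] ∧ s.getLast? ≠ some ' ' then [' '] else []

-- what A appends for one word
def pvF (w : List Char) : List Char := w.flatMap pvLtr ++ [' ']

lemma pvMem_minus (c : Char) (h1 : 97 ≤ c.toNat) (h2 : c.toNat ≤ 122) : c ∈ pvMinus := by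
  obtain ⟨n, hn⟩ : ∃ n, c.toNat = n := ⟨_, rfl⟩
  have h := Char.ofNat_toNat c
  rw [hn] at h h1 h2
  rw [← h]
  interval_cases n <;> decide

lemma pvMem_maius (c : Char) (h1 : 65 ≤ c.toNat) (h2 : c.toNat ≤ 90) : c ∈ pvMaius := by
  obtain ⟨n, hn⟩ : ∃ n, c.toNat = n := ⟨_, rfl⟩
  have h := Char.ofNat_toNat c
  rw [hn] at h h1 h2
  rw [← h]
  interval_cases n <;> decide

lemma pvLe_iff (c d : Char) : c ≤ d ↔ c.toNat ≤ d.toNat := ge_iff_le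

-- the 26-iteration inner scan of A appends exactly pvLtr c
lemma pvInner26 (nova : List Char) (c : Char) :
    (List.range 26).foldl (fun nv k =>
      if c = pvMinus.getD k ' ' then nv ++ [pvMaius.getD k ' ']
      else if c = pvMaius.getD k ' ' then nv ++ [c] else nv) nova = nova ++ pvLtr c := by
  have hsplit : (List.range 26).foldl (fun nv k =>
      if c = pvMinus.getD k ' ' then nv ++ [pvMaius.getD k ' ']
      else if c = pvMaius.getD k ' ' then nv ++ [c] else nv) nova
      = nova ++ (List.range 26).flatMap (fun k =>
          if c = pvMinus.getD k ' ' then [pvMaius.getD k ' ']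
          else if c = pvMaius.getD k ' ' then [c] else []) := by
    have h1 := PySem.List.foldl_congr_mem (l := List.range 26) (init := nova)
      (f := fun nv k =>
        if c = pvMinus.getD k ' ' then nv ++ [pvMaius.getD k ' ']
        else if c = pvMaius.getD k ' ' then nv ++ [c] else nv)
      (g := fun nv k => nv ++
        (if c = pvMinus.getD k ' ' then [pvMaius.getD k ' ']
         else if c = pvMaius.getD k ' ' then [c] else []))
      (by intro acc k _; simp only []; split_ifs <;> simp)
    rw [h1, PySem.List.foldl_append_eq_flatMap]
  rw [hsplit]
  congr 1
  by_cases hm : c ∈ pvMinus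
  · fin_cases hm <;> decide
  · by_cases hM : c ∈ pvMaius
    · fin_cases hM <;> decide
    · have hlo : ¬ ('a' ≤ c ∧ c ≤ 'z') := by
        intro ⟨ha, hb⟩
        exact hm (pvMem_minus c ((pvLe_iff _ _).mp ha) ((pvLe_iff _ _).mp hb))
      have hhi : ¬ ('A' ≤ c ∧ c ≤ 'Z') := by
        intro ⟨ha, hb⟩
        exact hM (pvMem_maius c ((pvLe_iff _ _).mp ha) ((pvLe_iff _ _).mp hb))
      have hz : (List.range 26).flatMap (fun k =>
          (if c = pvMinus.getD k ' ' then [pvMaius.getD k ' ']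
           else if c = pvMaius.getD k ' ' then [c] else [])) = ([] : List Char) := by
        rw [List.flatMap_eq_nil_iff]
        intro k hk
        have hk26 : k < 26 := List.mem_range.mp hk
        have hmk : pvMinus.getD k ' ' ∈ pvMinus := by interval_cases k <;> decide
        have hMk : pvMaius.getD k ' ' ∈ pvMaius := by interval_cases k <;> decide
        rw [if_neg (fun h : c = pvMinus.getD k ' ' => hm (h ▸ hmk)),
            if_neg (fun h : c = pvMaius.getD k ' ' => hM (h ▸ hMk))]
      rw [hz]
      simp [pvLtr, hlo, hhi]

-- A's per-word double loop appends exactly w.flatMap pvLtr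
lemma pvWord (nova w : List Char) :
    w.foldl (fun nova cj =>
      (List.range 26).foldl (fun nv k =>
        if cj = pvMinus.getD k ' ' then nv ++ [pvMaius.getD k ' ']
        else if cj = pvMaius.getD k ' ' then nv ++ [cj] else nv) nova) nova
      = nova ++ w.flatMap pvLtr := by
  have h1 := PySem.List.foldl_congr_mem (l := w) (init := nova)
    (f := fun nova cj =>
      (List.range 26).foldl (fun nv k =>
        if cj = pvMinus.getD k ' ' then nv ++ [pvMaius.getD k ' ']
        else if cj = pvMaius.getD k ' ' then nv ++ [cj] else nv) nova)
    (g := fun nova cj => nova ++ pvLtr cj)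
    (by intro acc cj _; exact pvInner26 acc cj)
  rw [h1, PySem.List.foldl_append_eq_flatMap]

-- pvEnd ignores a leading character when more follow
lemma pvEnd_cons (c : Char) (rest : List Char) (h : rest ≠ []) : pvEnd (c :: rest) = pvEnd rest := by
  cases rest with
  | nil => exact absurd rfl h
  | cons d t => simp [pvEnd]

-- the word phase of A, fused with the word-to-letters phase, is one pass over the characters
lemma pvSep_main (s : List Char) : s ≠ [] → ∀ (palavra : List Char) (palavras : List (List Char)),
    (pvSeparar palavra palavras s).flatMap pvF
      = palavras.flatMap pvF ++ palavra.flatMap pvLtr ++ s.flatMap pvTr ++ pvEnd s := by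
  induction s with
  | nil => intro h; exact absurd rfl h
  | cons c rest ih =>
    intro _ palavra palavras
    by_cases hr : rest = []
    · subst hr
      by_cases hc : c = ' '
      · subst hc
        simp [pvSeparar, pvF, pvTr, pvEnd]
      · simp [pvSeparar, hc, pvF, pvTr, pvEnd]
    · by_cases hc : c = ' '
      · subst hc
        simp only [pvSeparar, reduceIte]
        rw [ih hr, pvEnd_cons _ _ hr]
        simp [pvTr, pvF]
      · simp only [pvSeparar, if_neg hc, if_neg hr]
        rw [ih hr, pvEnd_cons _ _ hr]
        simp [pvTr, hc]

-- ===== VERDICT (by name: the statement is the Claim_ definition above) =====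
-- each side, written as one flatMap over the input
lemma pvA_eq (s : List Char) :
    palavraMaius (String.ofList s) = String.ofList ((pvSeparar [] [] s).flatMap pvF) := by
  simp only [palavraMaius, String.toList_ofList]
  congr 1
  have h1 := PySem.List.foldl_congr_mem (l := pvSeparar [] [] s) (init := ([] : List Char))
    (f := fun nova palavra =>
      (palavra.foldl (fun nova cj =>
        (List.range 26).foldl (fun nv k =>
          if cj = pvMinus.getD k ' ' then nv ++ [pvMaius.getD k ' ']
          else if cj = pvMaius.getD k ' ' then nv ++ [cj] else nv) nova) nova) ++ [' '])
    (g := fun nova palavra => nova ++ pvF palavra)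
    (by intro acc w _; simp only []; rw [pvWord]; simp [pvF])
  rw [h1, PySem.List.foldl_append_eq_flatMap]
  simp

lemma pvB_eq (s : List Char) :
    palavraMaius_alt (String.ofList s) = String.ofList (s.flatMap pvTr ++ pvEnd s) := by
  simp only [palavraMaius_alt, String.toList_ofList]
  congr 1
  have h1 := PySem.List.foldl_congr_mem (l := s) (init := ([] : List Char))
    (f := fun out c =>
      if c = ' ' then out ++ [' ']
      else if 'a' ≤ c ∧ c ≤ 'z' then out ++ [Char.ofNat (c.toNat - 32)]
      else if 'A' ≤ c ∧ c ≤ 'Z' then out ++ [c]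
      else out)
    (g := fun out c => out ++ pvTr c)
    (by intro acc c _; simp only [pvTr, pvLtr]; split_ifs <;> simp)
  rw [h1, PySem.List.foldl_append_eq_flatMap]
  simp [pvEnd]
  split_ifs <;> simp

-- ===== VERDICT (by name: the statement is the Claim_ definition above) =====
theorem palavraMaius_spec : Claim_equal_palavraMaius := by
  intro string _
  show palavraMaius string = palavraMaius_alt string
  obtain ⟨s, rfl⟩ : ∃ s, string = String.ofList s := ⟨string.toList, by simp⟩
  rw [pvA_eq, pvB_eq]
  cases hs : s with
  | nil => simp [pvSeparar, pvEnd]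
  | cons c rest =>
    rw [← hs, pvSep_main s (by simp [hs])]
    simp
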